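-- pv_equiv track=rewrite | github.com/debkbanerji/pokemon-decklist-detector | data_fetcher/fetch_data.py | compute_detection_keywords_for_name
-- ===== SOURCE A (Python) =====
-- def compute_detection_keywords_for_name(target_name, all_names):
--     # Edge cases - to prevent false squawkabilly and scream tail detection
--     special_cases = ["billy & o'nare", "jumbo ice cream"]
--     if target_name.lower() in special_cases:
--         return [target_name]
--
--     # look at all possible prefixes and postfixes for target_name
--     # for each of these that are not a substring present within all_names, add them to the result list
--
--     result = []
--     target_name = target_name.strip()
--     words = target_name.split()
--     n = len(words)
--
--     # Remove exact matches to the target name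
--     filtered_names = [name.strip() for name in all_names if name.strip() != target_name]
--
--     # Word-based prefixes
--     for i in range(1, n + 1):
--         prefix = ' '.join(words[:i])
--         if not any(prefix in name for name in filtered_names) and len(prefix) > 4:
--             result.append(prefix)
--
--     # Word-based postfixes
--     for i in range(n):
--         postfix = ' '.join(words[i:])
--         if not any(postfix in name for name in filtered_names) and len(postfix) > 4:
--             result.append(postfix)
--
--     # Remove the word 'stadium' from the result if present, to prevent false positives
--     result = [keyword for keyword in result if keyword.lower() != 'stadium']
--
--     return result
-- ===== SOURCE B (Python) =====
-- def compute_detection_keywords_for_name(target_name, all_names):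
--     # Edge cases - to prevent false squawkabilly and scream tail detection
--     if target_name.lower() in ("billy & o'nare", "jumbo ice cream"):
--         return [target_name]
--
--     target = target_name.strip()
--     words = target.split()
--     filtered = [name.strip() for name in all_names if name.strip() != target]
--
--     def keep(k):
--         return len(k) > 4 and k.lower() != 'stadium' and not any(k in name for name in filtered)
--
--     # build all word-based prefixes incrementally (no repeated joins)
--     prefixes = []
--     if words:
--         acc = words[0]
--         prefixes.append(acc)
--         for w in words[1:]:
--             acc = acc + ' ' + w
--             prefixes.append(acc)
--
--     # build all word-based postfixes back-to-front, then restore order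
--     postfixes = []
--     if words:
--         acc = words[-1]
--         postfixes.append(acc)
--         for w in reversed(words[:-1]):
--             acc = w + ' ' + acc
--             postfixes.append(acc)
--         postfixes.reverse()
--
--     return [k for k in prefixes + postfixes if keep(k)]
-- ===== Notes on version B (the rewrite author's own statement) =====
-- stated objective: alternative
-- what changed: Instead of re-joining a word slice for every index (quadratic string building) and filtering 'stadium' in a final pass, B builds all prefixes in one incremental left-to-right accumulation and all postfixes in one back-to-front accumulation, then applies a single combined keep-predicate pass.
import Mathlib
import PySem

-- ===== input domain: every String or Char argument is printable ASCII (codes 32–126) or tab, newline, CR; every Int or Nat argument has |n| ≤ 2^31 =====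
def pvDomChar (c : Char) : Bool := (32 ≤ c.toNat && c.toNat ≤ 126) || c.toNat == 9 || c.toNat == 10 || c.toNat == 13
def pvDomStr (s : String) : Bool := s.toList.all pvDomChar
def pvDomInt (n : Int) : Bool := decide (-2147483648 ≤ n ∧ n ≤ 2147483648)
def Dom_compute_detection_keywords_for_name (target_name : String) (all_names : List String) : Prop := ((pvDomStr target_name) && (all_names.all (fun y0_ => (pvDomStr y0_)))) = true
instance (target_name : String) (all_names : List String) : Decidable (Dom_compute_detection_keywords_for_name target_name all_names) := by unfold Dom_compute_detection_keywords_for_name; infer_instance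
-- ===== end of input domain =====

-- B rebuilds each keyword incrementally (prefixes left-to-right, postfixes back-to-front) instead of
-- re-joining a word slice per index, and applies one combined keep-predicate pass; return value proved equal.

-- ===== PORT A =====
def compute_detection_keywords_for_name (target_name : String) (all_names : List String) : List String :=
  let special_cases : List String := ["billy & o'nare", "jumbo ice cream"]
  if special_cases.contains (PySem.Str.lower target_name) then [target_name]
  else
    let target := PySem.Str.strip target_name
    let words := PySem.Str.split₀ target
    let n : Nat := words.length
    let filtered_names := (all_names.map PySem.Str.strip).filter (fun s => decide (s ≠ target))
    let result : List String :=
      (PySem.List.pyRange 1 ((n : Int) + 1) 1).foldl (fun res i =>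
        let pre := PySem.Str.join " " (PySem.List.slice words none (some i))
        if (!(filtered_names.any (fun name => PySem.Str.isIn pre name))) && decide (4 < PySem.Str.len pre)
        then res ++ [pre] else res) []
    let result :=
      (PySem.List.pyRange 0 (n : Int) 1).foldl (fun res i =>
        let post := PySem.Str.join " " (PySem.List.slice words (some i) none)
        if (!(filtered_names.any (fun name => PySem.Str.isIn post name))) && decide (4 < PySem.Str.len post)
        then res ++ [post] else res) result
    result.filter (fun k => decide (PySem.Str.lower k ≠ "stadium"))

-- ===== PORT B =====
-- incremental prefix accumulation: pvJoinGo acc ws = acc, acc⌣w₁, acc⌣w₁⌣w₂, …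
def pvJoinGo (acc : List Char) : List (List Char) → List (List Char)
  | [] => [acc]
  | w :: ws => acc :: pvJoinGo (acc ++ ' ' :: w) ws

def pvPrefixes : List (List Char) → List (List Char)
  | [] => []
  | w :: ws => pvJoinGo w ws

-- back-to-front postfix accumulation over the reversed word list
def pvPostGo (acc : List Char) : List (List Char) → List (List Char)
  | [] => [acc]
  | w :: ws => acc :: pvPostGo (w ++ ' ' :: acc) ws

def pvPostfixes (ws : List (List Char)) : List (List Char) :=
  match ws.reverse with
  | [] => []
  | l :: rs => (pvPostGo l rs).reverse

def pvKeep (filtered : List (List Char)) (k : List Char) : Bool :=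
  decide (4 < k.length) && decide (PySem.Chars.lower k ≠ "stadium".toList) &&
    !(filtered.any (fun name => PySem.Chars.isIn k name))

def compute_detection_keywords_for_name_alt (target_name : String) (all_names : List String) : List String :=
  if ["billy & o'nare", "jumbo ice cream"].contains (PySem.Str.lower target_name) then [target_name]
  else
    let target := PySem.Chars.strip target_name.toList
    let words := PySem.Chars.split₀ target
    let filtered := (all_names.map (fun s => PySem.Chars.strip s.toList)).filter (fun s => decide (s ≠ target))
    ((pvPrefixes words ++ pvPostfixes words).filter (pvKeep filtered)).map String.ofList

-- ===== PRECONDITION & SPEC =====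
def Spec_compute_detection_keywords_for_name (target_name : String) (all_names : List String) (out : List String) : Prop := out = compute_detection_keywords_for_name_alt target_name all_names
instance (target_name : String) (all_names : List String) (out : List String) : Decidable (Spec_compute_detection_keywords_for_name target_name all_names out) := by unfold Spec_compute_detection_keywords_for_name; infer_instance

-- ===== CLAIM (what is proved, stated in full; the proofs are below) =====
def Claim_equal_compute_detection_keywords_for_name : Prop := ∀ (target_name : String) (all_names : List String), Dom_compute_detection_keywords_for_name target_name all_names → Spec_compute_detection_keywords_for_name target_name all_names (compute_detection_keywords_for_name target_name all_names)

-- ===== LEMMAS AND PROOFS =====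

theorem pv_join_head (w : List Char) (ws : List (List Char)) :
    PySem.Chars.join [' '] (w :: ws) = w ++ ws.flatMap (fun v => ' ' :: v) := by
  induction ws generalizing w with
  | nil => simp [PySem.Chars.join_singleton]
  | cons v vs ih =>
      rw [PySem.Chars.join_cons_cons, ih v]
      simp

theorem pv_join_cons (w : List Char) (ws : List (List Char)) (h : ws ≠ []) :
    PySem.Chars.join [' '] (w :: ws) = w ++ ' ' :: PySem.Chars.join [' '] ws := by
  cases ws with
  | nil => exact absurd rfl h
  | cons q rest => rw [PySem.Chars.join_cons_cons]; simp

theorem pv_joinGo_eq (ws : List (List Char)) (acc : List Char) :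
    pvJoinGo acc ws =
      (List.range (ws.length + 1)).map (fun i => acc ++ (ws.take i).flatMap (fun v => ' ' :: v)) := by
  induction ws generalizing acc with
  | nil => simp [pvJoinGo]
  | cons w ws ih =>
      rw [pvJoinGo, ih]
      simp [List.range_succ_eq_map, List.map_map, Function.comp_def, List.take_succ_cons,
        List.flatMap_cons]

theorem pv_prefixes_eq (ws : List (List Char)) :
    pvPrefixes ws =
      (List.range ws.length).map (fun i => PySem.Chars.join [' '] (ws.take (i + 1))) := by
  cases ws with
  | nil => rfl
  | cons w ws =>
      rw [pvPrefixes, pv_joinGo_eq]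
      simp only [List.length_cons]
      apply List.map_congr_left
      intro i _
      rw [List.take_succ_cons, pv_join_head]

theorem pv_postfold (front : List (List Char)) (l : List Char) :
    PySem.Chars.join [' '] (front ++ [l]) = front.foldr (fun w a => w ++ ' ' :: a) l := by
  induction front with
  | nil => simp [PySem.Chars.join_singleton]
  | cons w fr ih =>
      rw [List.cons_append, pv_join_cons _ _ (by simp), ih]
      simp

theorem pv_postGo_eq (rs : List (List Char)) (acc : List Char) :
    pvPostGo acc rs =
      (List.range (rs.length + 1)).map (fun i => (rs.take i).foldl (fun a w => w ++ ' ' :: a) acc) := by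
  induction rs generalizing acc with
  | nil => simp [pvPostGo]
  | cons w rs ih =>
      rw [pvPostGo, ih]
      simp [List.range_succ_eq_map, List.map_map, Function.comp_def, List.take_succ_cons]

theorem pv_join_drop (rs : List (List Char)) (l : List Char) (k : Nat) (hk : k ≤ rs.length) :
    PySem.Chars.join [' '] ((rs.reverse ++ [l]).drop k) =
      (rs.take (rs.length - k)).foldl (fun a w => w ++ ' ' :: a) l := by
  rw [List.drop_append_of_le_length (by simpa using hk), List.drop_reverse, pv_postfold,
    List.foldr_reverse]

theorem pv_postfixes_eq (ws : List (List Char)) :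
    pvPostfixes ws =
      (List.range ws.length).map (fun i => PySem.Chars.join [' '] (ws.drop i)) := by
  cases hrev : ws.reverse with
  | nil =>
      have h : ws = [] := by simpa using congrArg List.reverse hrev
      simp [pvPostfixes, h]

  | cons l rs =>
      have hws : ws = rs.reverse ++ [l] := by
        have h := congrArg List.reverse hrev
        simpa using h
      rw [pvPostfixes, hrev]
      show (pvPostGo l rs).reverse = _
      rw [pv_postGo_eq]
      apply List.ext_getElem
      · simp [hws]
      · intro k h1 h2
        have hklen : k ≤ rs.length := by simp [hws] at h2; omega
        rw [List.getElem_reverse, List.getElem_map, List.getElem_map, List.getElem_range,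
          List.getElem_range]
        conv_rhs => rw [hws]
        rw [pv_join_drop rs l k hklen]
        congr 2
        simp

-- the combined per-keyword test of A (length, non-containment, then the final 'stadium' pass) equals B's pvKeep
theorem pv_pred (fS : List String) (fC : List (List Char)) (h3 : fS.map String.toList = fC)
    (s : String) (k : List Char) (hs : s.toList = k) :
    (decide (PySem.Str.lower s ≠ "stadium") &&
      ((!(fS.any (fun name => PySem.Str.isIn s name))) && decide (4 < PySem.Str.len s))) =
    pvKeep fC k := by
  subst hs
  subst h3
  have hlen : decide (4 < PySem.Str.len s) = decide (4 < s.toList.length) := by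
    rw [PySem.Str.len_eq]
    simp
  have hlow : decide (PySem.Str.lower s ≠ "stadium") =
      decide (PySem.Chars.lower s.toList ≠ "stadium".toList) := by
    rw [← PySem.Str.toList_lower]
    exact (decide_eq_decide.mpr (not_congr String.toList_inj)).symm
  have hany : (fS.map String.toList).any (fun name => PySem.Chars.isIn s.toList name) =
      fS.any (fun name => PySem.Str.isIn s name) := by
    rw [List.any_map]
    simp [Function.comp_def, PySem.Str.isIn_eq]
  rw [pvKeep, hlen, hlow, hany]
  cases decide (4 < s.toList.length) <;>
    cases decide (PySem.Chars.lower s.toList ≠ "stadium".toList) <;>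
      cases fS.any (fun name => PySem.Str.isIn s name) <;> rfl

-- one side (prefixes or postfixes): A's filter-then-'stadium'-pass equals B's single pvKeep pass
theorem pv_side (fS : List String) (fC : List (List Char)) (h3 : fS.map String.toList = fC)
    (FS : Nat → String) (FC : Nat → List Char) (hF : ∀ k, (FS k).toList = FC k) (n : Nat) :
    List.filter (fun s => decide (PySem.Str.lower s ≠ "stadium"))
      (List.map FS
        (List.filter (fun k =>
            (!(fS.any (fun name => PySem.Str.isIn (FS k) name))) &&
              decide (4 < PySem.Str.len (FS k)))
          (List.range n))) =
    (((List.range n).map FC).filter (pvKeep fC)).map String.ofList := by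
  rw [List.filter_map, List.filter_filter, List.filter_map, List.map_map]
  rw [List.filter_congr (q := fun k => (pvKeep fC ∘ FC) k) ?_]
  · apply List.map_congr_left
    intro k _
    simp only [Function.comp]
    rw [← hF k, String.ofList_toList]
  · intro k _
    simp only [Function.comp]
    exact pv_pred fS fC h3 (FS k) (FC k) (hF k)

-- ===== VERDICT (by name: the statement is the Claim_ definition above) =====
theorem compute_detection_keywords_for_name_spec : Claim_equal_compute_detection_keywords_for_name := by
  intro target_name all_names _hdom
  unfold Spec_compute_detection_keywords_for_name
  unfold compute_detection_keywords_for_name compute_detection_keywords_for_name_alt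
  by_cases hsp : (["billy & o'nare", "jumbo ice cream"] : List String).contains (PySem.Str.lower target_name) = true
  · simp only [hsp, if_pos]
  · simp only [hsp, if_neg, Bool.false_eq_true, not_false_eq_true]
    -- abbreviations
    set tS := PySem.Str.strip target_name with htS
    set tC := PySem.Chars.strip target_name.toList with htC
    have h1 : tS.toList = tC := PySem.Str.toList_strip target_name
    set wsS := PySem.Str.split₀ tS with hwsS
    set wsC := PySem.Chars.split₀ tC with hwsC
    have h2 : wsS.map String.toList = wsC := by
      rw [hwsS, hwsC, PySem.Str.split₀_map_toList, h1]
    have h2n : wsC.length = wsS.length := by rw [← h2, List.length_map]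
    set fS := (all_names.map PySem.Str.strip).filter (fun s => decide (s ≠ tS)) with hfS
    set fC := (all_names.map (fun s => PySem.Chars.strip s.toList)).filter
        (fun s => decide (s ≠ tC)) with hfC
    have h3 : fS.map String.toList = fC := by
      rw [hfS, hfC]
      have hmm : all_names.map (fun s => PySem.Chars.strip s.toList) =
          (all_names.map PySem.Str.strip).map String.toList := by
        rw [List.map_map]
        apply List.map_congr_left
        intro s _
        exact (PySem.Str.toList_strip s).symm
      rw [hmm]
      conv_rhs => rw [List.filter_map]
      apply congrArg (List.map String.toList)
      apply List.filter_congr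
      intro s _
      simp only [Function.comp]
      rw [← h1]
      exact (decide_eq_decide.mpr (not_congr String.toList_inj)).symm
    -- canonical forms of the two index ranges
    have hpyr1 : PySem.List.pyRange 1 ((wsS.length : Int) + 1) 1 =
        (List.range wsS.length).map (fun k => ((k + 1 : Nat) : Int)) := by
      rw [PySem.List.pyRange_one]
      have hN : (((wsS.length : Int) + 1) - 1).toNat = wsS.length := by omega
      rw [hN]
      apply List.map_congr_left
      intro k _
      push_cast
      ring
    have hpyr0 : PySem.List.pyRange 0 (wsS.length : Int) 1 =
        (List.range wsS.length).map (fun k => ((k : Nat) : Int)) := by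
      rw [PySem.List.pyRange_one]
      have hN : ((wsS.length : Int) - 0).toNat = wsS.length := by omega
      rw [hN]
      apply List.map_congr_left
      intro k _
      ring
    rw [hpyr1, hpyr0, List.foldl_map, List.foldl_map]
    simp only [PySem.List.slice_to_natCast, PySem.List.slice_from_natCast]
    rw [PySem.List.foldl_append_if
        (p := fun k => (!(fS.any (fun name =>
            PySem.Str.isIn (PySem.Str.join " " (wsS.take (k + 1))) name))) &&
          decide (4 < PySem.Str.len (PySem.Str.join " " (wsS.take (k + 1)))))
        (f := fun k => PySem.Str.join " " (wsS.take (k + 1)))]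
    rw [PySem.List.foldl_append_if
        (p := fun k => (!(fS.any (fun name =>
            PySem.Str.isIn (PySem.Str.join " " (wsS.drop k)) name))) &&
          decide (4 < PySem.Str.len (PySem.Str.join " " (wsS.drop k))))
        (f := fun k => PySem.Str.join " " (wsS.drop k))]
    rw [List.nil_append, List.filter_append]
    -- B side
    rw [pv_prefixes_eq, pv_postfixes_eq, h2n, List.filter_append, List.map_append]
    apply congrArg₂ (· ++ ·)
    · exact pv_side fS fC h3 _ _ (fun k => by
        rw [PySem.Str.toList_join, List.map_take, h2]
        rfl) wsS.length
    · exact pv_side fS fC h3 _ _ (fun k => by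
        rw [PySem.Str.toList_join, List.map_drop, h2]
        rfl) wsS.length
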